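-- pv_equiv track=rewrite | github.com/skeggse/terraform-modules | lambda/deploy_function.py | skip_last
-- ===== SOURCE A (Python) =====
-- from typing import Any, Iterable, Optional
--
-- def skip_last(i: Iterable) -> Iterable:
--     i = iter(i)
--     try:
--         prev = next(i)
--     except StopIteration:
--         return
--     for value in i:
--         yield prev
--         prev = value
-- ===== SOURCE B (Python) =====
-- from itertools import tee
-- from typing import Iterable
--
-- def skip_last(i: Iterable) -> Iterable:
--     a, b = tee(i)
--     next(b, None)
--     yield from (x for x, _ in zip(a, b))
-- ===== Notes on version B (the rewrite author's own statement) =====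
-- stated objective: idiomatic
-- what changed: Replaced the explicit prev-lookahead loop with itertools.tee offset-pairing: zip the iterator with a copy advanced by one and emit the first component of each pair.
import Mathlib
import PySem

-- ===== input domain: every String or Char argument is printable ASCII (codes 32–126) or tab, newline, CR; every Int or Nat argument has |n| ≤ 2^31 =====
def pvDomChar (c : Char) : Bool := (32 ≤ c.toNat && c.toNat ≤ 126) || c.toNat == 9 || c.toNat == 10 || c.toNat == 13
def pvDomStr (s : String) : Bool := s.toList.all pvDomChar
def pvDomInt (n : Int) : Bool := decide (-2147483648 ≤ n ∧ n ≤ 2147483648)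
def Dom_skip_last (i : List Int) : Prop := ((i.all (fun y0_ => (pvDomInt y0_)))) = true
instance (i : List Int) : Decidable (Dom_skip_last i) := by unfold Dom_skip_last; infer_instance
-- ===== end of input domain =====

-- B replaces A's prev-lookahead loop by pairing the list with itself shifted by one (itertools.tee style); same O(n) cost, more idiomatic.

-- ===== PORT A =====
-- A: take the first element as `prev`, then for each further value yield prev and shift.
def skipLastLoop (prev : Int) : List Int → List Int
  | [] => []
  | v :: rest => prev :: skipLastLoop v rest

def skip_last (i : List Int) : List Int :=
  match i with
  | [] => []                 -- StopIteration on first next: generator yields nothing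
  | prev :: rest => skipLastLoop prev rest

-- ===== PORT B =====
-- B: tee the iterator, advance the second copy by one, zip and keep the first components.
def skip_last_alt (i : List Int) : List Int :=
  (i.zip (i.drop 1)).map Prod.fst

-- ===== PRECONDITION & SPEC =====
def Spec_skip_last (i : List Int) (out : List Int) : Prop := out = skip_last_alt i
instance (i : List Int) (out : List Int) : Decidable (Spec_skip_last i out) := by unfold Spec_skip_last; infer_instance

-- ===== CLAIM (what is proved, stated in full; the proofs are below) =====
def Claim_equal_skip_last : Prop := ∀ (i : List Int), Dom_skip_last i → Spec_skip_last i (skip_last i)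

-- ===== LEMMAS AND PROOFS =====
theorem skipLastLoop_eq_zip (prev : Int) (rest : List Int) :
    skipLastLoop prev rest = ((prev :: rest).zip rest).map Prod.fst := by
  induction rest generalizing prev with
  | nil => rfl
  | cons v vs ih => simp [skipLastLoop, ih v, List.zip]

-- ===== VERDICT (by name: the statement is the Claim_ definition above) =====
theorem skip_last_spec : Claim_equal_skip_last := by
  intro i _
  unfold Spec_skip_last skip_last skip_last_alt
  cases i with
  | nil => rfl
  | cons prev rest => simpa using skipLastLoop_eq_zip prev rest
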